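-- pv_equiv track=rewrite | github.com/supingisme/test | python/github/CppCode-Formatter/CodeFormatter.py | mark_double_quotation
-- ===== SOURCE A (Python) =====
-- def mark_double_quotation(input_str):
--     # 解析双引号的位置，并替换为特殊连续无空格字符，最后还原回来即可
--     copy_str = [c for c in input_str]
--     non_space_count = -1
--     pos = []
--     pos_with_space = []
--     raw_str = []
--     if len(input_str) <= 1:
--         return input_str, pos, raw_str
--     for idx in range(len(input_str)):
--         if input_str[idx] != ' ':
--             non_space_count += 1
--             if input_str[idx] == '"':
--                 pos.append(non_space_count)
--                 pos_with_space.append(idx)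
--
--     if (len(pos) % 2) != 0:
--         raise ValueError("双引号不配对，请检查。{}".format(input_str))
--     for idx in range(0, len(pos_with_space), 2):
--         raw_str.append((input_str[pos_with_space[idx]:pos_with_space[idx + 1] + 1]))
--         for pos_j in range(pos_with_space[idx], pos_with_space[idx + 1] + 1):
--             if copy_str[pos_j] != ' ':
--                 copy_str[pos_j] = '#'
--     return ''.join(copy_str), pos, raw_str
-- ===== SOURCE B (Python) =====
-- def mark_double_quotation(input_str):
--     # Single linear pass with an inside-quotes toggle instead of A's two-phase
--     # collect-positions-then-pairwise-mark approach.
--     pos = []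
--     raw_str = []
--     if len(input_str) <= 1:
--         return input_str, pos, raw_str
--     out = []
--     seg = []
--     inside = False
--     non_space_count = -1
--     for ch in input_str:
--         if ch != ' ':
--             non_space_count += 1
--         if ch == '"':
--             pos.append(non_space_count)
--             if inside:
--                 seg.append(ch)
--                 raw_str.append(''.join(seg))
--                 seg = []
--                 out.append('#')
--                 inside = False
--             else:
--                 seg = [ch]
--                 out.append('#')
--                 inside = True
--         elif inside:
--             seg.append(ch)
--             out.append(ch if ch == ' ' else '#')
--         else:
--             out.append(ch)
--     if inside:
--         raise ValueError("双引号不配对，请检查。{}".format(input_str))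
--     return ''.join(out), pos, raw_str
-- ===== Notes on version B (the rewrite author's own statement) =====
-- stated objective: alternative
-- what changed: Replaced A's two-phase algorithm (first collect quote positions by index scan, then pairwise re-scan and mutate the copy list over each index range) by a single linear pass with an inside-quotes toggle that emits the masked output, the position list and the raw segments in one traversal.
import Mathlib
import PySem

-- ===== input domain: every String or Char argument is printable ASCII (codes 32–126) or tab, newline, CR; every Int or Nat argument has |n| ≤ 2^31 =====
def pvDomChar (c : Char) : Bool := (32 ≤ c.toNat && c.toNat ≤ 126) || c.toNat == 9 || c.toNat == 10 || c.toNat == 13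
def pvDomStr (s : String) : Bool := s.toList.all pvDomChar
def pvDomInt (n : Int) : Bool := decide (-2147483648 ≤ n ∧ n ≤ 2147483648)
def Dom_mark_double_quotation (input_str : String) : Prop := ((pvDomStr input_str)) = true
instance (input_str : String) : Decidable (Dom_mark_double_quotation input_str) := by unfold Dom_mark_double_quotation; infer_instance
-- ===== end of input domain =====

-- B replaces A's two-phase collect-quote-positions-then-pairwise-mark algorithm by a single
-- linear pass with an inside-quotes toggle (objective: alternative, same cost).

-- ===== PORT A =====
-- the body of A's first loop: for idx in range(len(input_str)): ...
def mark_double_quotation_step1 (copy_str : List Char) (st : Int × List Int × List Int)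
    (idx : Int) : Int × List Int × List Int :=
  let c := PySem.List.pyGetD copy_str idx ' '   -- input_str[idx]; idx always in range here
  if c ≠ ' ' then
    if c = '"' then (st.1 + 1, st.2.1 ++ [st.1 + 1], st.2.2 ++ [idx])
    else (st.1 + 1, st.2.1, st.2.2)
  else st

-- the body of A's innermost loop: for pos_j in range(...): if copy_str[pos_j] != ' ': copy_str[pos_j] = '#'
def mark_double_quotation_mark (cp : List Char) (j : Int) : List Char :=
  if PySem.List.pyGetD cp j ' ' ≠ ' ' then PySem.List.pySetD cp j '#' else cp

-- the body of A's second loop: for idx in range(0, len(pos_with_space), 2): ...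
def mark_double_quotation_step2 (copy_str : List Char) (pws : List Int)
    (st : List Char × List String) (idx : Int) : List Char × List String :=
  let a := PySem.List.pyGetD pws idx 0
  let b := PySem.List.pyGetD pws (idx + 1) 0
  let raws := st.2 ++ [String.ofList (PySem.List.slice copy_str (some a) (some (b + 1)))]
  let cp := (PySem.List.pyRange a (b + 1) 1).foldl (mark_double_quotation_mark) st.1
  (cp, raws)

def mark_double_quotation (input_str : String) : String × List Int × List String :=
  let copy_str := input_str.toList
  if PySem.Str.len input_str ≤ 1 then (input_str, [], [])
  else
    let s1 := (PySem.List.pyRange 0 (PySem.Str.len input_str) 1).foldl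
      (mark_double_quotation_step1 copy_str) (-1, [], [])
    -- (if len(pos) % 2 != 0 Python raises ValueError here; those inputs are outside Pre_)
    let pws := s1.2.2
    let s2 := (PySem.List.pyRange 0 (PySem.List.len pws) 2).foldl
      (mark_double_quotation_step2 copy_str pws) (copy_str, [])
    (String.ofList s2.1, s1.2.1, s2.2)

-- ===== PORT B =====
-- the body of B's single loop, carrying (out, seg, inside, non_space_count, pos, raw_str)
def mark_double_quotation_alt_step
    (s : List Char × List Char × Bool × Int × List Int × List String) (ch : Char) :
    List Char × List Char × Bool × Int × List Int × List String :=
  let out := s.1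
  let seg := s.2.1
  let inside := s.2.2.1
  let nsc := if ch ≠ ' ' then s.2.2.2.1 + 1 else s.2.2.2.1
  let pos := s.2.2.2.2.1
  let raws := s.2.2.2.2.2
  if ch = '"' then
    if inside then
      (out ++ ['#'], ([] : List Char), false, nsc, pos ++ [nsc], raws ++ [String.ofList (seg ++ [ch])])
    else
      (out ++ ['#'], [ch], true, nsc, pos ++ [nsc], raws)
  else if inside then
    (out ++ [if ch = ' ' then ch else '#'], seg ++ [ch], inside, nsc, pos, raws)
  else
    (out ++ [ch], seg, inside, nsc, pos, raws)

def mark_double_quotation_alt (input_str : String) : String × List Int × List String :=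
  if PySem.Str.len input_str ≤ 1 then (input_str, [], [])
  else
    let st := input_str.toList.foldl mark_double_quotation_alt_step
      (([] : List Char), ([] : List Char), false, (-1 : Int), ([] : List Int), ([] : List String))
    -- (if inside is still true Python raises ValueError here; those inputs are outside Pre_)
    (String.ofList st.1, st.2.2.2.2.1, st.2.2.2.2.2)

-- ===== PRECONDITION & SPEC =====
-- Pre_ excludes exactly the inputs where A raises ValueError (an odd number of double quotes
-- in a string of length > 1); B raises the same ValueError on the same inputs.
def Pre_mark_double_quotation (input_str : String) : Prop :=
  PySem.Str.len input_str ≤ 1 ∨ input_str.toList.count '"' % 2 = 0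
instance (input_str : String) : Decidable (Pre_mark_double_quotation input_str) := by
  unfold Pre_mark_double_quotation; infer_instance

def pvWitness_mark_double_quotation : String := "he said \"hi there\" twice"

def Spec_mark_double_quotation (input_str : String) (out : String × List Int × List String) : Prop :=
  out = mark_double_quotation_alt input_str
instance (input_str : String) (out : String × List Int × List String) :
    Decidable (Spec_mark_double_quotation input_str out) := by
  unfold Spec_mark_double_quotation; infer_instance

-- ===== CLAIM (what is proved, stated in full; the proofs are below) =====
def Claim_equal_mark_double_quotation : Prop := ∀ (input_str : String), Dom_mark_double_quotation input_str → Pre_mark_double_quotation input_str → Spec_mark_double_quotation input_str (mark_double_quotation input_str)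

-- ===== LEMMAS AND PROOFS =====

-- masking a single char / a segment
def pvMaskc (c : Char) : Char := if c = ' ' then c else '#'
def pvMask (l : List Char) : List Char := l.map pvMaskc

-- split a list at its first '"': l = v ++ '"' :: w with '"' ∉ v
def pvSeek : List Char → Option (List Char × List Char)
  | [] => none
  | c :: t =>
    if c = '"' then some ([], t)
    else match pvSeek t with
         | none => none
         | some (v, w) => some (c :: v, w)

theorem pvSeek_split {t v w : List Char} (h : pvSeek t = some (v, w)) :
    t = v ++ '"' :: w ∧ '"' ∉ v := by
  induction t generalizing v w with
  | nil => simp [pvSeek] at h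
  | cons c t ih =>
    by_cases hc : c = '"'
    · simp [pvSeek, hc] at h
      obtain ⟨rfl, rfl⟩ := h
      simp [hc]
    · simp only [pvSeek, if_neg hc] at h
      cases hs : pvSeek t with
      | none => rw [hs] at h; simp at h
      | some p =>
        rw [hs] at h
        cases p with
        | mk v' w' =>
          simp at h
          obtain ⟨hv, hw⟩ := h
          obtain ⟨h1, h2⟩ := ih hs
          subst hv hw
          refine ⟨by simp [h1], ?_⟩
          simp only [List.mem_cons, not_or]
          exact ⟨fun hh => hc hh.symm, h2⟩

theorem pvSeek_some_of_mem {t : List Char} (h : '"' ∈ t) : ∃ p, pvSeek t = some p := by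
  induction t with
  | nil => simp at h
  | cons c t ih =>
    by_cases hc : c = '"'
    · exact ⟨([], t), by simp [pvSeek, hc]⟩
    · have ht : '"' ∈ t := by
        rcases List.mem_cons.mp h with h1 | h1
        · exact absurd h1.symm hc
        · exact h1
      obtain ⟨⟨v, w⟩, hp⟩ := ih ht
      exact ⟨(c :: v, w), by simp [pvSeek, hc, hp]⟩

theorem pvSeek_len {t v w : List Char} (h : pvSeek t = some (v, w)) : w.length < t.length := by
  have := (pvSeek_split h).1
  subst this
  simp
  omega

-- the masked output
def pvMaskAll : List Char → List Char
  | [] => []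
  | c :: t =>
    if c = '"' then
      match h : pvSeek t with
      | some (v, w) => '#' :: (pvMask v ++ '#' :: pvMaskAll w)
      | none => c :: t
    else c :: pvMaskAll t
termination_by l => l.length
decreasing_by
  · exact Nat.lt_succ_of_lt (pvSeek_len h)
  · simp

-- the raw segments
def pvRaws : List Char → List String
  | [] => []
  | c :: t =>
    if c = '"' then
      match h : pvSeek t with
      | some (v, w) => String.ofList ('"' :: (v ++ ['"'])) :: pvRaws w
      | none => []
    else pvRaws t
termination_by l => l.length
decreasing_by
  · exact Nat.lt_succ_of_lt (pvSeek_len h)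
  · simp

theorem pvMaskAll_nil : pvMaskAll [] = [] := by simp [pvMaskAll]

theorem pvMaskAll_cons_of_ne {c : Char} (t : List Char) (hc : ¬ c = '"') :
    pvMaskAll (c :: t) = c :: pvMaskAll t := by
  rw [pvMaskAll]
  simp [hc]

theorem pvMaskAll_cons_quote {t v w : List Char} (h : pvSeek t = some (v, w)) :
    pvMaskAll ('"' :: t) = '#' :: (pvMask v ++ '#' :: pvMaskAll w) := by
  rw [pvMaskAll, if_pos rfl]
  split
  · rename_i v' w' heq
    rw [h] at heq
    cases heq
    rfl
  · rename_i heq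
    rw [h] at heq
    simp at heq

theorem pvRaws_nil : pvRaws [] = [] := by simp [pvRaws]

theorem pvRaws_cons_of_ne {c : Char} (t : List Char) (hc : ¬ c = '"') :
    pvRaws (c :: t) = pvRaws t := by
  rw [pvRaws]
  simp [hc]

theorem pvRaws_cons_quote {t v w : List Char} (h : pvSeek t = some (v, w)) :
    pvRaws ('"' :: t) = String.ofList ('"' :: (v ++ ['"'])) :: pvRaws w := by
  rw [pvRaws, if_pos rfl]
  split
  · rename_i v' w' heq
    rw [h] at heq
    cases heq
    rfl
  · rename_i heq
    rw [h] at heq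
    simp at heq

-- number of non-space characters, as Int
def pvNs (l : List Char) : Int := (l.countP (fun c => c != ' ') : Int)

-- the pos list: the value appended at each quote; the accumulator mirrors non_space_count
def pvNpos : List Char → Int → List Int
  | [], _ => []
  | c :: t, nsc =>
    if c = '"' then (nsc + 1) :: pvNpos t (nsc + 1)
    else pvNpos t (if c = ' ' then nsc else nsc + 1)

-- the quote-index list: indices (offset by i) of '"' in l
def pvQpos : List Char → Int → List Int
  | [], _ => []
  | c :: t, i => if c = '"' then i :: pvQpos t (i + 1) else pvQpos t (i + 1)

-- adjacent pairs
def pvPairs : List Int → List (Int × Int)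
  | a :: b :: t => (a, b) :: pvPairs t
  | _ => []

theorem pvNs_cons (c : Char) (t : List Char) :
    pvNs (c :: t) = (if c = ' ' then 0 else 1) + pvNs t := by
  by_cases h : c = ' ' <;>
    simp [pvNs, List.countP_cons, h] <;>
    push_cast <;>
    ring

theorem pvNs_append (x y : List Char) : pvNs (x ++ y) = pvNs x + pvNs y := by
  simp [pvNs, List.countP_append]

theorem pvNpos_append (x y : List Char) (nsc : Int) :
    pvNpos (x ++ y) nsc = pvNpos x nsc ++ pvNpos y (nsc + pvNs x) := by
  induction x generalizing nsc with
  | nil => simp [pvNpos, pvNs]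
  | cons c t ih =>
    by_cases hc : c = '"'
    · have hs : c ≠ ' ' := by rw [hc]; decide
      simp only [List.cons_append, pvNpos, if_pos hc, ih, pvNs_cons, if_neg hs]
      rw [show nsc + (1 + pvNs t) = nsc + 1 + pvNs t by ring]
    · by_cases hs : c = ' '
      · simp only [List.cons_append, pvNpos, if_neg hc, if_pos hs, ih, pvNs_cons]
        simp
      · simp only [List.cons_append, pvNpos, if_neg hc, if_neg hs, ih, pvNs_cons]
        rw [show nsc + (1 + pvNs t) = nsc + 1 + pvNs t by ring]

theorem pvNpos_nil_of_no_quote {x : List Char} (h : '"' ∉ x) (nsc : Int) :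
    pvNpos x nsc = [] := by
  induction x generalizing nsc with
  | nil => rfl
  | cons c t ih =>
    have hc : c ≠ '"' := by rintro rfl; exact h (by simp)
    simp only [pvNpos, if_neg hc]
    exact ih (fun hm => h (by simp [hm])) _

theorem pvQpos_append (x y : List Char) (i : Int) :
    pvQpos (x ++ y) i = pvQpos x i ++ pvQpos y (i + x.length) := by
  induction x generalizing i with
  | nil => simp [pvQpos]
  | cons c t ih =>
    by_cases hc : c = '"'
    · simp only [List.cons_append, pvQpos, if_pos hc, ih, List.length_cons, List.cons_append]
      rw [show i + 1 + (t.length : Int) = i + ((t.length : Int) + 1) by ring]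
      push_cast
      ring_nf
    · simp only [List.cons_append, pvQpos, if_neg hc, ih, List.length_cons]
      rw [show i + 1 + (t.length : Int) = i + ((t.length : Int) + 1) by ring]
      push_cast
      ring_nf

theorem pvQpos_nil_of_no_quote {x : List Char} (h : '"' ∉ x) (i : Int) :
    pvQpos x i = [] := by
  induction x generalizing i with
  | nil => rfl
  | cons c t ih =>
    have hc : c ≠ '"' := by rintro rfl; exact h (by simp)
    simp only [pvQpos, if_neg hc]
    exact ih (fun hm => h (by simp [hm])) _

theorem pvQpos_length (L : List Char) (i : Int) :
    (pvQpos L i).length = L.count '"' := by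
  induction L generalizing i with
  | nil => simp [pvQpos]
  | cons c t ih =>
    by_cases hc : c = '"'
    · simp [pvQpos, hc, ih, List.count_cons]
    · simp [pvQpos, hc, ih, List.count_cons]

-- ---- phase 1 of A: the index scan equals a structural scan ----

def pvF1 (st : Int × List Int × List Int) (p : Int × Char) : Int × List Int × List Int :=
  if p.2 ≠ ' ' then
    if p.2 = '"' then (st.1 + 1, st.2.1 ++ [st.1 + 1], st.2.2 ++ [p.1])
    else (st.1 + 1, st.2.1, st.2.2)
  else st

theorem pvF1_fold (L : List Char) : ∀ (i0 nsc : Int) (pos pws : List Int),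
    (PySem.List.enumerate L i0).foldl pvF1 (nsc, pos, pws)
      = (nsc + pvNs L, pos ++ pvNpos L nsc, pws ++ pvQpos L i0) := by
  induction L with
  | nil => intro i0 nsc pos pws; simp [PySem.List.enumerate, pvNs, pvNpos, pvQpos]
  | cons c t ih =>
    intro i0 nsc pos pws
    rw [show PySem.List.enumerate (c :: t) i0 = (i0, c) :: PySem.List.enumerate t (i0 + 1) from by
      simp [PySem.List.enumerate]]
    rw [List.foldl_cons]
    by_cases hq : c = '"'
    · subst hq
      rw [show pvF1 (nsc, pos, pws) (i0, '"') = (nsc + 1, pos ++ [nsc + 1], pws ++ [i0]) from by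
        simp [pvF1]]
      rw [ih]
      simp [pvNs_cons, pvNpos, pvQpos, add_assoc]
    · by_cases hs : c = ' '
      · subst hs
        rw [show pvF1 (nsc, pos, pws) (i0, ' ') = (nsc, pos, pws) from by simp [pvF1]]
        rw [ih]
        simp [pvNs_cons, pvNpos, pvQpos]
      · rw [show pvF1 (nsc, pos, pws) (i0, c) = (nsc + 1, pos, pws) from by simp [pvF1, hq, hs]]
        rw [ih]
        simp [pvNs_cons, pvNpos, pvQpos, hq, hs, add_assoc]

theorem pvA1 (L : List Char) :
    (PySem.List.pyRange 0 (L.length : Int) 1).foldl (mark_double_quotation_step1 L) (-1, [], [])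
      = (-1 + pvNs L, pvNpos L (-1), pvQpos L 0) := by
  have hmap : (PySem.List.pyRange 0 (L.length : Int) 1).foldl
      (mark_double_quotation_step1 L) (-1, [], [])
        = (PySem.List.enumerate L).foldl pvF1 (-1, [], []) := by
    rw [PySem.List.enumerate_eq_map_pyRange L ' ', List.foldl_map, PySem.List.len_eq]
    rfl
  rw [hmap]
  simpa using pvF1_fold L 0 (-1) [] []

-- ---- the step-2 index loop over an even-length list is a loop over adjacent pairs ----

theorem pvFoldTwo {σ : Type} (F : σ → Int → σ) (n : Nat) (s : σ) :
    (PySem.List.pyRange 0 (2 * (n : Int)) 2).foldl F s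
      = (List.range n).foldl (fun (s : σ) (j : Nat) => F s (2 * (j : Int))) s := by
  rw [PySem.List.pyRange_of_pos _ _ (by norm_num)]
  have he : (if (0 : Int) < 2 * (n : Int) then ((2 * (n : Int) - 0 + 2 - 1) / 2).toNat else 0) = n := by
    split_ifs with h <;> omega
  rw [he, List.foldl_map]
  simp only [zero_add]

theorem pvFoldPairs {σ : Type} (f : σ → Int → Int → σ) :
    ∀ (k : Nat) (pws : List Int), pws.length = 2 * k → ∀ (s : σ),
    (List.range k).foldl (fun s j => f s (pws.getD (2 * j) 0) (pws.getD (2 * j + 1) 0)) s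
      = (pvPairs pws).foldl (fun s p => f s p.1 p.2) s := by
  intro k
  induction k with
  | zero =>
    intro pws h s
    match pws with
    | [] => simp [pvPairs]
    | a :: t => simp at h
  | succ k ih =>
    intro pws h s
    match pws with
    | [] => simp at h
    | [a] =>
      exfalso
      have h1 : (1 : Nat) = 2 * (k + 1) := by simpa using h
      omega
    | a :: b :: t =>
      have ht : t.length = 2 * k := by
        simp at h
        omega
      rw [List.range_succ_eq_map, List.foldl_cons, List.foldl_map]
      rw [show (a :: b :: t).getD (2 * 0) 0 = a from by norm_num]
      rw [show (a :: b :: t).getD (2 * 0 + 1) 0 = b from by norm_num]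
      have hcg : ∀ (acc : σ), ∀ j ∈ List.range k,
          (fun (x : σ) (y : Nat) => (fun (s : σ) (j : Nat) =>
              f s ((a :: b :: t).getD (2 * j) 0) ((a :: b :: t).getD (2 * j + 1) 0)) x (Nat.succ y)) acc j
            = (fun (s : σ) (j : Nat) => f s (t.getD (2 * j) 0) (t.getD (2 * j + 1) 0)) acc j := by
        intro acc j _
        dsimp only
        rw [show 2 * Nat.succ j = 2 * j + 1 + 1 from by omega]
        rw [show 2 * j + 1 + 1 + 1 = (2 * j + 1) + 1 + 1 from by omega]
        rw [List.getD_cons_succ, List.getD_cons_succ, List.getD_cons_succ, List.getD_cons_succ]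
      rw [PySem.List.foldl_congr_mem (List.range k) _ _ _ hcg]
      rw [ih t ht (f s a b)]
      simp [pvPairs]

theorem pvFoldPairsPy {σ : Type} (f : σ → Int → Int → σ) (k : Nat) (pws : List Int)
    (h : pws.length = 2 * k) (s : σ) :
    (PySem.List.pyRange 0 (2 * (k : Int)) 2).foldl
        (fun s idx => f s (PySem.List.pyGetD pws idx 0) (PySem.List.pyGetD pws (idx + 1) 0)) s
      = (pvPairs pws).foldl (fun s p => f s p.1 p.2) s := by
  rw [pvFoldTwo]
  have hcg : ∀ (acc : σ), ∀ j ∈ List.range k,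
      (fun (s : σ) (j : Nat) =>
          f s (PySem.List.pyGetD pws (2 * (j : Int)) 0) (PySem.List.pyGetD pws (2 * (j : Int) + 1) 0)) acc j
        = (fun (s : σ) (j : Nat) => f s (pws.getD (2 * j) 0) (pws.getD (2 * j + 1) 0)) acc j := by
    intro acc j _
    dsimp only
    rw [show (2 * (j : Int)) = ((2 * j : Nat) : Int) from by push_cast; ring]
    rw [show (((2 * j : Nat) : Int) + 1) = ((2 * j + 1 : Nat) : Int) from by push_cast; ring]
    rw [PySem.List.pyGetD_natCast, PySem.List.pyGetD_natCast]
  rw [PySem.List.foldl_congr_mem (List.range k) _ _ _ hcg]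
  exact pvFoldPairs f k pws h s

-- ---- the inner marking loop of A masks one segment in place ----

theorem pvMark1_at (pre X : List Char) (c : Char) :
    mark_double_quotation_mark (pre ++ c :: X) (pre.length : Int) = pre ++ pvMaskc c :: X := by
  unfold mark_double_quotation_mark pvMaskc
  rw [PySem.List.pyGetD_natCast, PySem.List.pySetD_natCast]
  by_cases hs : c = ' '
  · simp [hs]
  · simp [hs]

theorem pvMarkRange : ∀ (seg pre post : List Char),
    (PySem.List.pyRange (pre.length : Int) ((pre.length : Int) + (seg.length : Int)) 1).foldl
        mark_double_quotation_mark (pre ++ (seg ++ post))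
      = pre ++ (pvMask seg ++ post) := by
  intro seg
  induction seg with
  | nil =>
    intro pre post
    rw [PySem.List.pyRange_one_eq_nil (by simp)]
    simp [pvMask]
  | cons c s ih =>
    intro pre post
    rw [PySem.List.pyRange_one_cons (by
      have h1 : (0 : Int) < (((c :: s).length : Nat) : Int) := by
        simp
      omega)]
    rw [List.foldl_cons]
    rw [show pre ++ (c :: s ++ post) = pre ++ c :: (s ++ post) from by simp]
    rw [pvMark1_at]
    have e1 : ((pre.length : Int) + 1) = (((pre ++ [pvMaskc c]).length : Nat) : Int) := by
      simp
    have e2 : ((pre.length : Int) + (((c :: s).length : Nat) : Int))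
        = ((((pre ++ [pvMaskc c]).length : Nat) : Int) + ((s.length : Nat) : Int)) := by
      simp
      push_cast
      ring
    rw [show pre ++ pvMaskc c :: (s ++ post) = (pre ++ [pvMaskc c]) ++ (s ++ post) from by simp]
    rw [e1, e2, ih (pre ++ [pvMaskc c]) post]
    simp [pvMask]

-- ---- phase 2 of A over the pair list ----

def pvF2 (orig : List Char) (st : List Char × List String) (a b : Int) :
    List Char × List String :=
  ((PySem.List.pyRange a (b + 1) 1).foldl mark_double_quotation_mark st.1,
   st.2 ++ [String.ofList (PySem.List.slice orig (some a) (some (b + 1)))])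

theorem pvMask_seg (v : List Char) :
    pvMask ('"' :: (v ++ ['"'])) = '#' :: (pvMask v ++ ['#']) := by
  simp [pvMask, pvMaskc]

theorem pvPhase2 : ∀ (n : Nat) (L : List Char), L.length ≤ n → L.count '"' % 2 = 0 →
    ∀ (orig pre : List Char), (∃ pre0, orig = pre0 ++ L ∧ pre0.length = pre.length) →
    ∀ (raws0 : List String),
    (pvPairs (pvQpos L (pre.length : Int))).foldl
        (fun st p => pvF2 orig st p.1 p.2) (pre ++ L, raws0)
      = (pre ++ pvMaskAll L, raws0 ++ pvRaws L) := by
  intro n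
  induction n with
  | zero =>
    intro L hL _ orig pre _ raws0
    have hnil : L = [] := by
      cases L with
      | nil => rfl
      | cons a t => simp at hL
    subst hnil
    simp [pvQpos, pvPairs, pvMaskAll_nil, pvRaws_nil]
  | succ n ih =>
    intro L hL hcnt orig pre hor raws0
    obtain ⟨pre0, hor0, hlen0⟩ := hor
    cases L with
    | nil => simp [pvQpos, pvPairs, pvMaskAll_nil, pvRaws_nil]
    | cons c t =>
      by_cases hc : c = '"'
      · subst hc
        have htodd : t.count '"' % 2 = 1 := by
          rw [List.count_cons_self] at hcnt
          omega
        have htmem : '"' ∈ t := by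
          by_contra hnm
          rw [List.count_eq_zero.mpr hnm] at htodd
          simp at htodd
        obtain ⟨⟨v, w⟩, hseek⟩ := pvSeek_some_of_mem htmem
        obtain ⟨hsplit, hnv⟩ := pvSeek_split hseek
        subst hsplit
        have hv0 : v.count '"' = 0 := List.count_eq_zero.mpr hnv
        have hwcnt : w.count '"' % 2 = 0 := by
          rw [List.count_cons_self, List.count_append, List.count_cons_self, hv0] at hcnt
          omega
        have hq : pvQpos ('"' :: (v ++ '"' :: w)) (pre.length : Int)
            = (pre.length : Int) :: (((pre.length : Int) + 1 + (v.length : Int)) ::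
              pvQpos w ((pre.length : Int) + 1 + (v.length : Int) + 1)) := by
          rw [show pvQpos ('"' :: (v ++ '"' :: w)) (pre.length : Int)
              = (pre.length : Int) :: pvQpos (v ++ '"' :: w) ((pre.length : Int) + 1) from by
            simp [pvQpos]]
          rw [pvQpos_append, pvQpos_nil_of_no_quote hnv, List.nil_append]
          rw [show pvQpos ('"' :: w) ((pre.length : Int) + 1 + (v.length : Int))
              = ((pre.length : Int) + 1 + (v.length : Int)) ::
                pvQpos w ((pre.length : Int) + 1 + (v.length : Int) + 1) from by
            simp [pvQpos]]
        rw [hq]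
        simp only [pvPairs, List.foldl_cons]
        have hstep : pvF2 orig (pre ++ ('"' :: (v ++ '"' :: w)), raws0) (pre.length : Int)
              ((pre.length : Int) + 1 + (v.length : Int))
            = (pre ++ (pvMask ('"' :: (v ++ ['"'])) ++ w),
               raws0 ++ [String.ofList ('"' :: (v ++ ['"']))]) := by
          unfold pvF2
          have hb1 : ((pre.length : Int) + 1 + (v.length : Int) + 1)
              = ((pre.length : Int) + ((('"' :: (v ++ ['"'])).length : Nat) : Int)) := by
            simp
            push_cast
            ring
          congr 1
          · rw [hb1]
            rw [show pre ++ ('"' :: (v ++ '"' :: w)) = pre ++ (('"' :: (v ++ ['"'])) ++ w) from by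
              simp]
            exact pvMarkRange ('"' :: (v ++ ['"'])) pre w
          · have hsl : PySem.List.slice orig (some (pre.length : Int))
                (some ((pre.length : Int) + 1 + (v.length : Int) + 1)) = '"' :: (v ++ ['"']) := by
              have hc1 : ((pre.length : Int)) = ((pre0.length : Nat) : Int) := by
                rw [hlen0]
              have hc2 : ((pre.length : Int) + 1 + (v.length : Int) + 1)
                  = ((pre0.length + (v.length + 2) : Nat) : Int) := by
                push_cast
                omega
              rw [hor0, hc2, hc1, PySem.List.slice_natCast, List.drop_left]
              rw [show pre0.length + (v.length + 2) - pre0.length = v.length + 2 from by omega]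
              rw [show v.length + 2 = (v.length + 1) + 1 from rfl, List.take_succ_cons,
                List.take_append]
              rw [List.take_of_length_le (by omega : v.length ≤ v.length + 1)]
              rw [show v.length + 1 - v.length = 1 from by omega]
              simp
            rw [hsl]
        rw [hstep]
        have hww : w.length ≤ n := by
          simp at hL
          omega
        have hc3 : ((pre.length : Int) + 1 + (v.length : Int) + 1)
            = (((pre ++ pvMask ('"' :: (v ++ ['"']))).length : Nat) : Int) := by
          simp [pvMask]
          push_cast
          ring
        rw [hc3]
        rw [show pre ++ (pvMask ('"' :: (v ++ ['"'])) ++ w)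
            = (pre ++ pvMask ('"' :: (v ++ ['"']))) ++ w from by simp]
        rw [ih w hww hwcnt orig (pre ++ pvMask ('"' :: (v ++ ['"'])))
          ⟨pre0 ++ ('"' :: (v ++ ['"'])), by rw [hor0]; simp, by simp [pvMask, hlen0]⟩
          (raws0 ++ [String.ofList ('"' :: (v ++ ['"']))])]
        rw [pvMaskAll_cons_quote hseek, pvRaws_cons_quote hseek, pvMask_seg]
        simp
      · have hq : pvQpos (c :: t) (pre.length : Int)
            = pvQpos t ((((pre ++ [c]).length : Nat)) : Int) := by
          simp [pvQpos, hc]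
        rw [hq]
        have hcnt' : t.count '"' % 2 = 0 := by
          rwa [List.count_cons_of_ne hc] at hcnt
        rw [show pre ++ c :: t = (pre ++ [c]) ++ t from by simp]
        rw [ih t (by simp at hL; omega) hcnt' orig (pre ++ [c])
          ⟨pre0 ++ [c], by rw [hor0]; simp, by simp [hlen0]⟩ raws0]
        rw [pvMaskAll_cons_of_ne t hc, pvRaws_cons_of_ne t hc]
        simp

theorem pvPhase2_top (L : List Char) (hcnt : L.count '"' % 2 = 0) :
    (pvPairs (pvQpos L 0)).foldl (fun st p => pvF2 L st p.1 p.2) (L, ([] : List String))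
      = (pvMaskAll L, pvRaws L) := by
  have h := pvPhase2 L.length L le_rfl hcnt L ([] : List Char) ⟨[], by simp, by simp⟩ []
  simpa using h

-- ---- the B fold ----

theorem pvFB_inside (v : List Char) (hv : '"' ∉ v) :
    ∀ (out seg : List Char) (nsc : Int) (pos : List Int) (raws : List String),
    v.foldl mark_double_quotation_alt_step (out, seg, true, nsc, pos, raws)
      = (out ++ pvMask v, seg ++ v, true, nsc + pvNs v, pos, raws) := by
  induction v with
  | nil => intro out seg nsc pos raws; simp [pvMask, pvNs]
  | cons c s ih =>
    intro out seg nsc pos raws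
    have hc : c ≠ '"' := by rintro rfl; exact hv (by simp)
    have hvs : '"' ∉ s := fun hm => hv (by simp [hm])
    rw [List.foldl_cons]
    by_cases hsp : c = ' '
    · rw [show mark_double_quotation_alt_step (out, seg, true, nsc, pos, raws) c
          = (out ++ [c], seg ++ [c], true, nsc, pos, raws) from by
        simp [mark_double_quotation_alt_step, hc, hsp]]
      rw [ih hvs]
      simp [pvMask, pvMaskc, pvNs_cons, hsp]
    · rw [show mark_double_quotation_alt_step (out, seg, true, nsc, pos, raws) c
          = (out ++ ['#'], seg ++ [c], true, nsc + 1, pos, raws) from by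
        simp [mark_double_quotation_alt_step, hc, hsp]]
      rw [ih hvs]
      simp [pvMask, pvMaskc, pvNs_cons, hsp, add_assoc]

theorem pvFB_outside : ∀ (n : Nat) (L : List Char), L.length ≤ n → L.count '"' % 2 = 0 →
    ∀ (out : List Char) (nsc : Int) (pos : List Int) (raws : List String),
    L.foldl mark_double_quotation_alt_step (out, [], false, nsc, pos, raws)
      = (out ++ pvMaskAll L, [], false, nsc + pvNs L, pos ++ pvNpos L nsc, raws ++ pvRaws L) := by
  intro n
  induction n with
  | zero =>
    intro L hL _ out nsc pos raws
    have hnil : L = [] := by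
      cases L with
      | nil => rfl
      | cons a t => simp at hL
    subst hnil
    simp [pvMaskAll_nil, pvRaws_nil, pvNpos, pvNs]
  | succ n ih =>
    intro L hL hcnt out nsc pos raws
    cases L with
    | nil => simp [pvMaskAll_nil, pvRaws_nil, pvNpos, pvNs]
    | cons c t =>
      by_cases hc : c = '"'
      · subst hc
        have htodd : t.count '"' % 2 = 1 := by
          rw [List.count_cons_self] at hcnt
          omega
        have htmem : '"' ∈ t := by
          by_contra hnm
          rw [List.count_eq_zero.mpr hnm] at htodd
          simp at htodd
        obtain ⟨⟨v, w⟩, hseek⟩ := pvSeek_some_of_mem htmem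
        obtain ⟨hsplit, hnv⟩ := pvSeek_split hseek
        subst hsplit
        have hv0 : v.count '"' = 0 := List.count_eq_zero.mpr hnv
        have hwcnt : w.count '"' % 2 = 0 := by
          rw [List.count_cons_self, List.count_append, List.count_cons_self, hv0] at hcnt
          omega
        have hwlen : w.length ≤ n := by
          simp at hL
          omega
        rw [List.foldl_cons]
        rw [show mark_double_quotation_alt_step (out, [], false, nsc, pos, raws) '"'
            = (out ++ ['#'], ['"'], true, nsc + 1, pos ++ [nsc + 1], raws) from by
          simp [mark_double_quotation_alt_step]]
        rw [show (v ++ '"' :: w) = v ++ ('"' :: w) from rfl, List.foldl_append]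
        rw [pvFB_inside v hnv]
        rw [List.foldl_cons]
        rw [show mark_double_quotation_alt_step (out ++ ['#'] ++ pvMask v, ['"'] ++ v, true,
              nsc + 1 + pvNs v, pos ++ [nsc + 1], raws) '"'
            = (out ++ ['#'] ++ pvMask v ++ ['#'], [], false, nsc + 1 + pvNs v + 1,
              (pos ++ [nsc + 1]) ++ [nsc + 1 + pvNs v + 1],
              raws ++ [String.ofList ((['"'] ++ v) ++ ['"'])]) from by
          simp [mark_double_quotation_alt_step]]
        rw [ih w hwlen hwcnt]
        rw [pvMaskAll_cons_quote hseek, pvRaws_cons_quote hseek]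
        have hnsL : pvNs ('"' :: (v ++ '"' :: w)) = 1 + (pvNs v + (1 + pvNs w)) := by
          rw [pvNs_cons, pvNs_append, pvNs_cons]
          simp
        have hposL : pvNpos ('"' :: (v ++ '"' :: w)) nsc
            = (nsc + 1) :: ((nsc + 1 + pvNs v + 1) :: pvNpos w (nsc + 1 + pvNs v + 1)) := by
          rw [show pvNpos ('"' :: (v ++ '"' :: w)) nsc
              = (nsc + 1) :: pvNpos (v ++ '"' :: w) (nsc + 1) from by simp [pvNpos]]
          rw [pvNpos_append, pvNpos_nil_of_no_quote hnv, List.nil_append]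
          rw [show pvNpos ('"' :: w) (nsc + 1 + pvNs v)
              = (nsc + 1 + pvNs v + 1) :: pvNpos w (nsc + 1 + pvNs v + 1) from by simp [pvNpos]]
        rw [hnsL, hposL]
        simp [add_assoc]
      · rw [List.foldl_cons]
        have hcnt' : t.count '"' % 2 = 0 := by
          rwa [List.count_cons_of_ne hc] at hcnt
        by_cases hsp : c = ' '
        · rw [show mark_double_quotation_alt_step (out, [], false, nsc, pos, raws) c
              = (out ++ [c], [], false, nsc, pos, raws) from by
            simp [mark_double_quotation_alt_step, hc, hsp]]
          rw [ih t (by simp at hL; omega) hcnt' (out ++ [c]) nsc pos raws]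
          rw [pvMaskAll_cons_of_ne t hc, pvRaws_cons_of_ne t hc]
          simp [pvNs_cons, pvNpos, hsp, hc]
        · rw [show mark_double_quotation_alt_step (out, [], false, nsc, pos, raws) c
              = (out ++ [c], [], false, nsc + 1, pos, raws) from by
            simp [mark_double_quotation_alt_step, hc, hsp]]
          rw [ih t (by simp at hL; omega) hcnt' (out ++ [c]) (nsc + 1) pos raws]
          rw [pvMaskAll_cons_of_ne t hc, pvRaws_cons_of_ne t hc]
          simp [pvNs_cons, pvNpos, hsp, hc, add_assoc]

-- ---- assembly ----

theorem pvA_val (input_str : String)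
    (hg : ¬ PySem.Str.len input_str ≤ 1)
    (heven : input_str.toList.count '"' % 2 = 0) :
    mark_double_quotation input_str
      = (String.ofList (pvMaskAll input_str.toList), pvNpos input_str.toList (-1),
         pvRaws input_str.toList) := by
  simp only [mark_double_quotation]
  rw [if_neg hg]
  rw [PySem.Str.len_eq]
  rw [pvA1 input_str.toList]
  dsimp only
  obtain ⟨k, hk⟩ : ∃ k, (pvQpos input_str.toList 0).length = 2 * k :=
    ⟨(pvQpos input_str.toList 0).length / 2, by rw [pvQpos_length]; omega⟩
  have hlen2 : PySem.List.len (pvQpos input_str.toList 0) = 2 * (k : Int) := by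
    rw [PySem.List.len_eq, hk]
    push_cast
    ring
  rw [hlen2]
  have h2 : (PySem.List.pyRange 0 (2 * (k : Int)) 2).foldl
      (mark_double_quotation_step2 input_str.toList (pvQpos input_str.toList 0))
      (input_str.toList, ([] : List String))
        = (pvPairs (pvQpos input_str.toList 0)).foldl
          (fun s p => pvF2 input_str.toList s p.1 p.2) (input_str.toList, []) :=
    pvFoldPairsPy (pvF2 input_str.toList) k (pvQpos input_str.toList 0) hk
      (input_str.toList, [])
  rw [h2, pvPhase2_top input_str.toList heven]

theorem pvB_val (input_str : String)
    (hg : ¬ PySem.Str.len input_str ≤ 1)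
    (heven : input_str.toList.count '"' % 2 = 0) :
    mark_double_quotation_alt input_str
      = (String.ofList (pvMaskAll input_str.toList), pvNpos input_str.toList (-1),
         pvRaws input_str.toList) := by
  simp only [mark_double_quotation_alt]
  rw [if_neg hg]
  rw [pvFB_outside input_str.toList.length input_str.toList le_rfl heven [] (-1) [] []]
  simp

-- ===== VERDICT (by name: the statement is the Claim_ definition above) =====
theorem mark_double_quotation_spec : Claim_equal_mark_double_quotation := by
  intro input_str _ hpre
  unfold Spec_mark_double_quotation
  by_cases hg : PySem.Str.len input_str ≤ 1
  · simp only [mark_double_quotation, mark_double_quotation_alt]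
    rw [if_pos hg, if_pos hg]
  · have heven : input_str.toList.count '"' % 2 = 0 := by
      cases hpre with
      | inl h => exact absurd h hg
      | inr h => exact h
    rw [pvA_val input_str hg heven, pvB_val input_str hg heven]
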